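-- pv_equiv track=rewrite | github.com/thealper2/codewars-solutions | 7-kyu/always_perfect.py | check_root
-- ===== SOURCE A (Python) =====
-- import math
--
-- def check_root(string):
--     try:
--         arr = [int(x.strip()) for x in string.split(',')]
--         if len(arr) != 4:
--             return "incorrect input"
--
--         if any(arr[i] + 1 != arr[i + 1] for i in range(len(arr) - 1)):
--             return "not consecutive"
--
--         product = 1
--         for num in arr:
--             product *= num
--
--         target = product + 1
--         root = math.isqrt(target)
--         return f"{target}, {root}"
--
--     except (ValueError, AttributeError):
--         return "incorrect input"
-- ===== SOURCE B (Python) =====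
-- def check_root(string):
--     try:
--         arr = [int(x.strip()) for x in string.split(',')]
--     except (ValueError, AttributeError):
--         return "incorrect input"
--     if len(arr) != 4:
--         return "incorrect input"
--     if arr[1] != arr[0] + 1 or arr[2] != arr[0] + 2 or arr[3] != arr[0] + 3:
--         return "not consecutive"
--     n = arr[0]
--     r = n * n + 3 * n + 1          # n(n+1)(n+2)(n+3) + 1 == (n^2 + 3n + 1)^2
--     return f"{r * r}, {abs(r)}"
-- ===== Notes on version B (the rewrite author's own statement) =====
-- stated objective: simpler
-- what changed: B replaces A's product loop plus math.isqrt with the closed form n(n+1)(n+2)(n+3)+1 = (n^2+3n+1)^2 (target = r*r, root = abs(r) with r = n^2+3n+1) and checks consecutiveness by three direct comparisons against arr[0] instead of any() over a range.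
import Mathlib
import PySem

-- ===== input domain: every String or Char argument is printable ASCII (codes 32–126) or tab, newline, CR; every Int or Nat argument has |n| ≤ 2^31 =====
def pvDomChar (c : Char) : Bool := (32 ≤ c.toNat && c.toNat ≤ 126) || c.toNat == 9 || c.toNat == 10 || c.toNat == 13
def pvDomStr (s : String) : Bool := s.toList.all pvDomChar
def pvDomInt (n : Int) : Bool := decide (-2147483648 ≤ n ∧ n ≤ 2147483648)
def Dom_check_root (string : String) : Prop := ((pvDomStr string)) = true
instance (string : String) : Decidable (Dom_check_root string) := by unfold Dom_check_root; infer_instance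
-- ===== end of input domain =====

-- B computes the answer by the closed form n(n+1)(n+2)(n+3)+1 = (n²+3n+1)² instead of A's
-- product loop plus integer square root (objective: simpler; same parsing and validation).

-- ===== PORT A =====
-- shared parsing helper: [int(x.strip()) for x in string.split(',')], none = ValueError
-- (both Pythons contain this line verbatim; int(x) on a str never raises AttributeError)
def pvParse (string : String) : Option (List Int) :=
  (PySem.Chars.splitOn string.toList [',']).mapM
    (fun x => PySem.Int.ofChars? (PySem.Chars.strip x))

def check_root (string : String) : String :=
  match pvParse string with
  | none => "incorrect input"
  | some arr =>
    if arr.length ≠ 4 then "incorrect input"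
    else if (PySem.List.pyRange 0 ((arr.length : Int) - 1) 1).any
        (fun i => decide (PySem.List.pyGetD arr i 0 + 1 ≠ PySem.List.pyGetD arr (i + 1) 0))
      then "not consecutive"
    else
      let product := arr.foldl (fun p num => p * num) 1
      let target := product + 1
      -- math.isqrt; at this point target = n(n+1)(n+2)(n+3)+1 ≥ 0, so isqrt never raises
      let root : Int := Int.ofNat (Nat.sqrt target.toNat)
      PySem.Int.toStr target ++ ", " ++ PySem.Int.toStr root

-- ===== PORT B =====
def check_root_alt (string : String) : String :=
  match pvParse string with
  | none => "incorrect input"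
  | some arr =>
    if arr.length ≠ 4 then "incorrect input"
    else if PySem.List.pyGetD arr 1 0 ≠ PySem.List.pyGetD arr 0 0 + 1 ∨
            PySem.List.pyGetD arr 2 0 ≠ PySem.List.pyGetD arr 0 0 + 2 ∨
            PySem.List.pyGetD arr 3 0 ≠ PySem.List.pyGetD arr 0 0 + 3
      then "not consecutive"
    else
      let n := PySem.List.pyGetD arr 0 0
      let r := n * n + 3 * n + 1
      PySem.Int.toStr (r * r) ++ ", " ++ PySem.Int.toStr |r|

-- ===== PRECONDITION & SPEC =====
def Spec_check_root (string : String) (out : String) : Prop := out = check_root_alt string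
instance (string : String) (out : String) : Decidable (Spec_check_root string out) := by unfold Spec_check_root; infer_instance

-- ===== CLAIM (what is proved, stated in full; the proofs are below) =====
def Claim_equal_check_root : Prop := ∀ (string : String), Dom_check_root string → Spec_check_root string (check_root string)

-- ===== LEMMAS AND PROOFS =====
theorem pvLen4 (l : List Int) (h : l.length = 4) : ∃ a b c d, l = [a, b, c, d] := by
  rcases l with _ | ⟨a, _ | ⟨b, _ | ⟨c, _ | ⟨d, _ | ⟨e, t⟩⟩⟩⟩⟩ <;> simp_all

theorem pvRoot (r : Int) : ((Nat.sqrt ((r * r).toNat) : Nat) : Int) = |r| := by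
  have h2 : (r * r).toNat = r.natAbs * r.natAbs := by
    have := Int.natAbs_mul_self (a := r); omega
  rw [h2, show r.natAbs * r.natAbs = r.natAbs ^ 2 by ring, Nat.sqrt_eq']
  exact (Int.abs_eq_natAbs r).symm

theorem pvMain (s : String) : check_root s = check_root_alt s := by
  unfold check_root check_root_alt
  cases hp : pvParse s with
  | none => rfl
  | some arr =>
    by_cases hl : arr.length = 4
    · obtain ⟨a, b, c, d, rfl⟩ := pvLen4 arr hl
      simp only [List.length_cons, List.length_nil, ne_eq]
      norm_num
      have hrange : PySem.List.pyRange 0 ((4 : Int) - 1) 1 = [0, 1, 2] := by decide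
      rw [show ((0 + 1 + 1 + 1 + 1 : Nat) : Int) - 1 = (4 : Int) - 1 by norm_num, hrange]
      norm_num [List.any_cons, List.any_nil, PySem.List.pyGetD, PySem.List.pyGet?,
        PySem.List.pyIdx?, show ((2 : Int)).toNat = 2 from rfl,
        show ((3 : Int)).toNat = 3 from rfl]
      by_cases hc : b = a + 1 ∧ c = a + 2 ∧ d = a + 3
      · obtain ⟨hb, hcc, hd⟩ := hc; subst hb; subst hcc; subst hd
        rw [if_neg (by omega), if_neg (by omega)]
        have h1 : a * (a + 1) * (a + 2) * (a + 3) + 1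
            = (a * a + 3 * a + 1) * (a * a + 3 * a + 1) := by ring
        rw [h1, pvRoot]
      · rw [if_pos (by omega), if_pos (by omega)]
    · simp [hl]

theorem check_root_spec : Claim_equal_check_root := by
  intro s _
  unfold Spec_check_root
  exact pvMain s
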